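-- pv_equiv track=rewrite | github.com/tatadyj/leetcode | 2866.beautiful-towers-ii/2866.beautiful-towers-ii.py | get_one_side
-- ===== SOURCE A (Python) =====
-- def get_one_side(maxHeights):
--     n = len(maxHeights)
--     left = [0] * n
--     stack = []
--     for i in range(n):
--         if not stack:
--             left[i] = maxHeights[i]
--         elif maxHeights[stack[-1]] <= maxHeights[i]:
--             left[i] = maxHeights[i] + left[i-1]
--         else:
--             while stack and maxHeights[stack[-1]] > maxHeights[i]:
--                 j = stack.pop()
--             if stack:
--                 left[i] = maxHeights[i] * (i - stack[-1]) + left[stack[-1]]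
--             else:
--                 left[i] = maxHeights[i] * (i + 1)
--         stack.append(i)
--     return left
-- ===== SOURCE B (Python) =====
-- def get_one_side(maxHeights):
--     n = len(maxHeights)
--     left = [0] * n
--     prev = [0] * n  # prev[i] = nearest j < i with maxHeights[j] <= maxHeights[i], or -1
--     for i in range(n):
--         j = i - 1
--         while j >= 0 and maxHeights[j] > maxHeights[i]:
--             j = prev[j]
--         prev[i] = j
--         if j >= 0:
--             left[i] = maxHeights[i] * (i - j) + left[j]
--         else:
--             left[i] = maxHeights[i] * (i + 1)
--     return left
-- ===== Notes on version B (the rewrite author's own statement) =====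
-- stated objective: alternative
-- what changed: Replaces the monotonic stack and its pop loop by an array of skip-pointers prev[i] (nearest earlier index with value <= maxHeights[i]); each i is resolved by jumping j = prev[j] from i-1 and left[i] is computed from left[prev[i]] directly.
import Mathlib
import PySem

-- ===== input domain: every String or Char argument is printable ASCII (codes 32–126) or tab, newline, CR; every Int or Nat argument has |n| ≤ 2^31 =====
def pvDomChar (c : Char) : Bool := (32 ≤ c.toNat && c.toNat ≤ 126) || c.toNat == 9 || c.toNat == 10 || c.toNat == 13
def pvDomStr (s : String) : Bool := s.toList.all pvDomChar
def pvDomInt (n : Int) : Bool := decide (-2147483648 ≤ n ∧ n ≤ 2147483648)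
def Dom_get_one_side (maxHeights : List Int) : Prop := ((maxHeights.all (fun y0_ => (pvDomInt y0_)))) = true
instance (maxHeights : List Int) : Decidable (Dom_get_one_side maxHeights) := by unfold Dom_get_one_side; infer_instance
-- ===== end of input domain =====

-- B replaces A's monotonic stack by an array of skip-pointers prev[i]; same results, same amortized cost (objective: alternative).

-- ===== PORT A =====
-- one loop iteration of A: state = (left so far, stack of indices with head = Python's stack[-1])
def stepA (mh : List Int) (acc : List Int × List Nat) (i : Nat) : List Int × List Nat :=
  let left := acc.1
  let stack := acc.2
  match stack with
  | [] => (left ++ [mh.getD i 0], i :: stack)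
  | t :: _ =>
    if mh.getD t 0 ≤ mh.getD i 0 then
      (left ++ [mh.getD i 0 + left.getD (i - 1) 0], i :: stack)
    else
      -- Python's 'while stack and maxHeights[stack[-1]] > maxHeights[i]: stack.pop()'
      let stack' := stack.dropWhile (fun j => mh.getD i 0 < mh.getD j 0)
      match stack' with
      | [] => (left ++ [mh.getD i 0 * ((i : Int) + 1)], i :: stack')
      | t' :: _ => (left ++ [mh.getD i 0 * ((i : Int) - (t' : Int)) + left.getD t' 0], i :: stack')

def get_one_side (maxHeights : List Int) : List Int :=
  ((List.range maxHeights.length).foldl (stepA maxHeights) ([], [])).1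

-- ===== PORT B =====
-- 'while j >= 0 and maxHeights[j] > maxHeights[i]: j = prev[j]' with fuel for totality
-- (fuel i suffices: j starts at i-1 and strictly decreases, so the Python loop runs < i+1 times)
def jumpB (mh prev : List Int) (x : Int) : Nat → Int → Int
  | 0, j => j
  | f + 1, j => if 0 ≤ j ∧ x < mh.getD j.toNat 0 then jumpB mh prev x f (prev.getD j.toNat 0) else j

def stepB (mh : List Int) (acc : List Int × List Int) (i : Nat) : List Int × List Int :=
  let left := acc.1
  let prev := acc.2
  let j := jumpB mh prev (mh.getD i 0) i ((i : Int) - 1)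
  let v := if 0 ≤ j then mh.getD i 0 * ((i : Int) - j) + left.getD j.toNat 0
           else mh.getD i 0 * ((i : Int) + 1)
  (left ++ [v], prev ++ [j])

def get_one_side_alt (maxHeights : List Int) : List Int :=
  ((List.range maxHeights.length).foldl (stepB maxHeights) ([], [])).1

-- ===== PRECONDITION & SPEC =====
def Spec_get_one_side (maxHeights : List Int) (out : List Int) : Prop := out = get_one_side_alt maxHeights
instance (maxHeights : List Int) (out : List Int) : Decidable (Spec_get_one_side maxHeights out) := by unfold Spec_get_one_side; infer_instance

-- ===== CLAIM (what is proved, stated in full; the proofs are below) =====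
def Claim_equal_get_one_side : Prop := ∀ (maxHeights : List Int), Dom_get_one_side maxHeights → Spec_get_one_side maxHeights (get_one_side maxHeights)

-- ===== LEMMAS AND PROOFS =====

-- the chain of prev-pointers starting at j (as a list of indices), with fuel
def chainP (prev : List Int) : Nat → Int → List Nat
  | 0, _ => []
  | f + 1, j => if 0 ≤ j then j.toNat :: chainP prev f (prev.getD j.toNat 0) else []

lemma chainP_succ (prev : List Int) (f : Nat) (j : Int) :
    chainP prev (f + 1) j = if 0 ≤ j then j.toNat :: chainP prev f (prev.getD j.toNat 0) else [] := rfl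

lemma chainP_neg (prev : List Int) (f : Nat) (j : Int) (h : j < 0) :
    chainP prev f j = [] := by
  cases f with
  | zero => rfl
  | succ f => rw [chainP_succ, if_neg (by omega)]

lemma jumpB_succ (mh prev : List Int) (x : Int) (f : Nat) (j : Int) :
    jumpB mh prev x (f + 1) j =
      if 0 ≤ j ∧ x < mh.getD j.toNat 0 then jumpB mh prev x f (prev.getD j.toNat 0) else j := rfl

-- prev arrays we build are "good": every entry is in [-1, k)
def GoodP (prev : List Int) : Prop :=
  ∀ k : Nat, k < prev.length → -1 ≤ prev.getD k 0 ∧ prev.getD k 0 < (k : Int)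

lemma chainP_stable (prev : List Int) (H : GoodP prev) :
    ∀ (f : Nat) (j : Int), j < (f : Int) → j < (prev.length : Int) →
      chainP prev (f + 1) j = chainP prev f j := by
  intro f
  induction f with
  | zero =>
    intro j hf _
    rw [chainP_neg prev 1 j (by omega), chainP_neg prev 0 j (by omega)]
  | succ f ih =>
    intro j hf hl
    by_cases hj : 0 ≤ j
    · have hjl : j.toNat < prev.length := by omega
      have := H j.toNat hjl
      rw [chainP_succ prev (f + 1) j, chainP_succ prev f j, if_pos hj, if_pos hj,
        ih (prev.getD j.toNat 0) (by omega) (by omega)]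
    · rw [chainP_neg prev _ j (by omega), chainP_neg prev _ j (by omega)]

lemma chainP_append (prev : List Int) (v : Int) (H : GoodP prev) :
    ∀ (f : Nat) (j : Int), j < (prev.length : Int) →
      chainP (prev ++ [v]) f j = chainP prev f j := by
  intro f
  induction f with
  | zero => intro j _; simp [chainP]
  | succ f ih =>
    intro j hl
    by_cases hj : 0 ≤ j
    · have hjl : j.toNat < prev.length := by omega
      have := H j.toNat hjl
      rw [chainP_succ (prev ++ [v]) f j, chainP_succ prev f j, if_pos hj, if_pos hj,
        List.getD_append _ _ _ _ hjl, ih (prev.getD j.toNat 0) (by omega)]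
    · rw [chainP_neg _ _ j (by omega), chainP_neg _ _ j (by omega)]

-- the jump loop computes exactly the drop of the chain past the indices with value > x
lemma jumpB_dropWhile (mh prev : List Int) (x : Int) (H : GoodP prev) :
    ∀ (f : Nat) (j : Int), -1 ≤ j → j < (f : Int) → j < (prev.length : Int) →
      -1 ≤ jumpB mh prev x f j ∧ jumpB mh prev x f j ≤ j ∧
      (chainP prev f j).dropWhile (fun k => x < mh.getD k 0) =
        chainP prev f (jumpB mh prev x f j) := by
  intro f
  induction f with
  | zero =>
    intro j h1 hf _
    have : j = -1 := by omega
    subst this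
    simp [jumpB, chainP]
  | succ f ih =>
    intro j h1 hf hl
    by_cases hj : 0 ≤ j
    · have hjl : j.toNat < prev.length := by omega
      have hP := H j.toNat hjl
      by_cases hx : x < mh.getD j.toNat 0
      · have hrec := ih (prev.getD j.toNat 0) (by omega) (by omega) (by omega)
        rw [jumpB_succ, if_pos ⟨hj, hx⟩]
        refine ⟨hrec.1, by omega, ?_⟩
        rw [chainP_succ, if_pos hj]
        rw [List.dropWhile_cons, if_pos (by simpa using hx), hrec.2.2]
        exact (chainP_stable prev H f _ (by omega)
          (by have := hrec.2.1; omega)).symm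
      · rw [jumpB_succ, if_neg (by tauto : ¬ (0 ≤ j ∧ x < mh.getD j.toNat 0))]
        refine ⟨h1, le_refl j, ?_⟩
        rw [chainP_succ, if_pos hj, List.dropWhile_cons, if_neg (by simpa using hx)]
    · have : j = -1 := by omega
      subst this
      rw [jumpB_succ, if_neg (by omega ∘ And.left)]
      refine ⟨by omega, le_refl _, ?_⟩
      rw [chainP_neg _ _ _ (by omega)]
      rfl

-- the simulation invariant: after i steps the left arrays agree and A's stack is
-- exactly the prev-chain starting at i-1
def SimInv (mh : List Int) (i : Nat) : Prop :=
  ((List.range i).foldl (stepA mh) ([], [])).1 = ((List.range i).foldl (stepB mh) ([], [])).1 ∧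
  ((List.range i).foldl (stepB mh) ([], [])).2.length = i ∧
  GoodP ((List.range i).foldl (stepB mh) ([], [])).2 ∧
  ((List.range i).foldl (stepA mh) ([], [])).2 =
    chainP ((List.range i).foldl (stepB mh) ([], [])).2 i ((i : Int) - 1)

lemma inv_step (mh : List Int) (i : Nat) (h : SimInv mh i) : SimInv mh (i + 1) := by
  set a := (List.range i).foldl (stepA mh) (([], []) : List Int × List Nat) with ha
  set b := (List.range i).foldl (stepB mh) (([], []) : List Int × List Int) with hb
  obtain ⟨hleft, hlen, hgood, hstack⟩ := h
  rw [← ha, ← hb] at hleft hstack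
  rw [← hb] at hlen hgood
  have hrange : List.range (i + 1) = List.range i ++ [i] := List.range_succ
  simp only [SimInv, hrange, List.foldl_append, List.foldl_cons, List.foldl_nil, ← ha, ← hb]
  -- the jump at step i
  set x := mh.getD i 0 with hx
  have hjmp := jumpB_dropWhile mh b.2 x hgood i ((i : Int) - 1) (by omega) (by omega) (by omega)
  set r := jumpB mh b.2 x i ((i : Int) - 1) with hr
  have hnewgood : GoodP (b.2 ++ [r]) := by
    intro k hk
    simp only [List.length_append, List.length_cons, List.length_nil] at hk
    by_cases hki : k < b.2.length
    · rw [List.getD_append _ _ _ _ hki]; exact hgood k hki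
    · have hkeq : k = b.2.length := by omega
      subst hkeq
      rw [List.getD_append_right _ _ _ _ (le_refl _)]
      simp only [Nat.sub_self, List.getD_cons_zero]
      exact ⟨hjmp.1, by omega⟩
  have hnewchain : ∀ s : List Nat,
      s = chainP b.2 i r → i :: s = chainP (b.2 ++ [r]) (i + 1) (((i + 1 : Nat) : Int) - 1) := by
    intro s hs
    have : (((i + 1 : Nat) : Int) - 1) = (i : Int) := by push_cast; ring
    rw [this]
    simp only [chainP, if_pos (by omega : (0:Int) ≤ (i:Int))]
    have hidx : (i : Int).toNat = i := by omega
    rw [hidx]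
    congr 1
    rw [List.getD_append_right _ _ _ _ (le_of_eq hlen)]
    simp only [hlen, Nat.sub_self, List.getD_cons_zero]
    rw [chainP_append b.2 r hgood i r (by omega)]
    exact hs
  rcases Nat.eq_zero_or_pos i with hi0 | hipos
  · -- i = 0 : A's empty-stack branch, B's jump is a no-op at j = -1
    subst hi0
    have hst : a.2 = [] := by rw [hstack]; exact chainP_neg _ _ _ (by norm_num)
    have hr0 : r = -1 := by rw [hr]; norm_num [jumpB]
    have hA : stepA mh a 0 = (a.1 ++ [mh.getD 0 0], [0]) := by
      simp only [stepA, hst]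
    have hB : stepB mh b 0 = (b.1 ++ [mh.getD 0 0 * ((0 : Nat) + 1 : Int)], b.2 ++ [r]) := by
      simp only [stepB, ← hx, ← hr]
      rw [if_neg (by rw [hr0]; norm_num)]
    rw [hA, hB]
    refine ⟨by rw [hleft]; norm_num, by simp [hlen], hnewgood, ?_⟩
    exact hnewchain [] (chainP_neg _ _ _ (by rw [hr0]; norm_num)).symm
  · -- i ≥ 1 : the stack is nonempty with top i-1
    have hi1 : ((i : Int) - 1) = ((i - 1 : Nat) : Int) := by omega
    have htop : a.2 = (i - 1) :: chainP b.2 i (b.2.getD (i - 1) 0) := by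
      rw [hstack]
      cases i with
      | zero => omega
      | succ m =>
        rw [chainP_succ, if_pos (by omega : (0:Int) ≤ ((m + 1 : Nat) : Int) - 1)]
        have h1 : (((m + 1 : Nat) : Int) - 1).toNat = m := by omega
        rw [h1, Nat.add_sub_cancel]
        congr 1
        have hgm := hgood m (by omega)
        exact (chainP_stable b.2 hgood m (b.2.getD m 0) (by omega) (by omega)).symm
    by_cases hle : mh.getD (i - 1) 0 ≤ x
    · -- A's elif branch; B's jump stops immediately at j = i-1
      have hrstop : r = (i : Int) - 1 := by
        rw [hr]
        cases i with
        | zero => omega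
        | succ m =>
          rw [jumpB_succ, if_neg]
          refine fun hc => absurd hc.2 ?_
          have h1 : (((m + 1 : Nat) : Int) - 1).toNat = m := by omega
          rw [h1]
          exact not_lt.mpr (by simpa [hx, Nat.add_sub_cancel] using hle)
      have hval : x + a.1.getD (i - 1) 0 =
          x * ((i : Int) - ((i : Int) - 1)) + b.1.getD ((i : Int) - 1).toNat 0 := by
        have h2 : ((i : Int) - ((i : Int) - 1)) = 1 := by ring
        rw [h2, hleft]
        have h3 : ((i : Int) - 1).toNat = i - 1 := by omega
        rw [h3]; ring
      have hA : stepA mh a i =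
          (a.1 ++ [x + a.1.getD (i - 1) 0],
           i :: (i - 1) :: chainP b.2 i (b.2.getD (i - 1) 0)) := by
        simp only [stepA, ← hx, htop]
        rw [if_pos hle]
      have hB : stepB mh b i =
          (b.1 ++ [x * ((i : Int) - ((i : Int) - 1)) + b.1.getD ((i : Int) - 1).toNat 0],
           b.2 ++ [(i : Int) - 1]) := by
        simp only [stepB, ← hx, ← hr, hrstop]
        rw [if_pos (by omega : (0 : Int) ≤ (i : Int) - 1)]
      rw [hA, hB]
      rw [hrstop] at hnewgood hnewchain
      refine ⟨by rw [hval, hleft], by simp [hlen], hnewgood, ?_⟩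
      exact hnewchain ((i - 1) :: chainP b.2 i (b.2.getD (i - 1) 0)) (htop.symm.trans hstack)
    · -- A's else branch: the pop loop equals B's jump
      rw [not_le] at hle
      have hdrop := hjmp.2.2
      rw [← hstack] at hdrop
      have hApop : List.dropWhile (fun j => x < mh.getD j 0)
          ((i - 1) :: chainP b.2 i (b.2.getD (i - 1) 0)) = chainP b.2 i r := by
        rw [← htop]; exact hdrop
      have hAstep : stepA mh a i =
          (a.1 ++ [if 0 ≤ r then x * ((i : Int) - r) + a.1.getD r.toNat 0 else x * ((i : Int) + 1)],
           i :: chainP b.2 i r) := by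
        simp only [stepA, ← hx, htop]
        rw [if_neg (not_le.mpr hle), hApop]
        by_cases hr0 : 0 ≤ r
        · have hchr : chainP b.2 i r = r.toNat :: chainP b.2 (i - 1) (b.2.getD r.toNat 0) := by
            cases i with
            | zero => omega
            | succ m =>
              rw [chainP_succ, if_pos hr0, Nat.add_sub_cancel]
          rw [hchr, if_pos hr0]
          have h4 : ((r.toNat : Nat) : Int) = r := by omega
          simp only [h4]
        · have hneg : r = -1 := by omega
          rw [hneg, chainP_neg _ _ _ (by norm_num), if_neg (by norm_num : ¬ (0 : Int) ≤ -1)]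
      have hBstep : stepB mh b i =
          (b.1 ++ [if 0 ≤ r then x * ((i : Int) - r) + b.1.getD r.toNat 0 else x * ((i : Int) + 1)],
           b.2 ++ [r]) := by
        simp only [stepB, ← hx, ← hr]
      rw [hAstep, hBstep]
      refine ⟨by rw [hleft], by simp [hlen], hnewgood, hnewchain (chainP b.2 i r) rfl⟩

lemma inv_all (mh : List Int) : ∀ i, SimInv mh i := by
  intro i
  induction i with
  | zero => exact ⟨rfl, rfl, by intro k hk; simp at hk, by simp [chainP]⟩
  | succ i ih => exact inv_step mh i ih

-- ===== VERDICT (by name: the statement is the Claim_ definition above) =====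
theorem get_one_side_spec : Claim_equal_get_one_side := by
  intro mh _
  unfold Spec_get_one_side get_one_side get_one_side_alt
  exact (inv_all mh mh.length).1
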